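-- pv_equiv track=rewrite | github.com/LucasTHOMAS18/SAE-Python-1 | histoire2foot.py | nb_matchs_sans_defaites
-- ===== SOURCE A (Python) =====
-- def equipe_gagnante(match):
--     """retourne le nom de l'équipe qui a gagné le match. Si c'est un match nul on retourne None
--
--     Args:
--         match (tuple): un match
--
--     Returns:
--         str: le nom de l'équipe gagnante (ou None si match nul)
--     """
--
--     if match[3] > match[4]:
--         return match[1]
--
--     if match[3] < match[4]:
--         return match[2]
--
-- def nb_matchs_sans_defaites(liste_matchs, equipe):
--     """retourne le plus grand nombre de matchs consécutifs sans défaite pour une equipe donnée.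
--
--     Args:
--         liste_matchs (list): une liste de matchs
--         equipe (str): le nom d'une équipe (pays)
--
--     Returns:
--         int: le plus grand nombre de matchs consécutifs sans défaite du pays nom_pays
--     """
--     # TODO refaire cette fonction
--     max_nb_victoires = 0
--     nb_victoires = 0
--
--     for match in liste_matchs:
--         if equipe_gagnante(match) == equipe:
--             nb_victoires += 1
--
--         elif equipe == match[1] or equipe == match[2]:
--             if nb_victoires > max_nb_victoires:
--                 max_nb_victoires = nb_victoires
--
--             nb_victoires = 0
--
--     if nb_victoires > max_nb_victoires:
--         max_nb_victoires = nb_victoires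
--
--     return max_nb_victoires
-- ===== SOURCE B (Python) =====
-- def nb_matchs_sans_defaites(liste_matchs, equipe):
--     """Plus grande serie de victoires consecutives de `equipe`
--     (les matchs ou l'equipe ne joue pas sont ignores; nul/defaite coupe la serie)."""
--     victoires = [(m[3] > m[4] and m[1] == equipe) or (m[3] < m[4] and m[2] == equipe)
--                  for m in liste_matchs if equipe in (m[1], m[2])]
--     meilleur = 0
--     rest = victoires
--     while rest:
--         serie = 0
--         while serie < len(rest) and rest[serie]:
--             serie += 1
--         if serie > meilleur:
--             meilleur = serie
--         rest = rest[serie + 1:]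
--     return meilleur
-- ===== Notes on version B (the rewrite author's own statement) =====
-- stated objective: alternative
-- what changed: B first builds the boolean win sequence of the matches the team played (filter+map), then scans it block by block, measuring each maximal win run at once and jumping past the separator, instead of A's single pass with a counter-and-reset pair of accumulators and a post-loop flush.
import Mathlib
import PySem

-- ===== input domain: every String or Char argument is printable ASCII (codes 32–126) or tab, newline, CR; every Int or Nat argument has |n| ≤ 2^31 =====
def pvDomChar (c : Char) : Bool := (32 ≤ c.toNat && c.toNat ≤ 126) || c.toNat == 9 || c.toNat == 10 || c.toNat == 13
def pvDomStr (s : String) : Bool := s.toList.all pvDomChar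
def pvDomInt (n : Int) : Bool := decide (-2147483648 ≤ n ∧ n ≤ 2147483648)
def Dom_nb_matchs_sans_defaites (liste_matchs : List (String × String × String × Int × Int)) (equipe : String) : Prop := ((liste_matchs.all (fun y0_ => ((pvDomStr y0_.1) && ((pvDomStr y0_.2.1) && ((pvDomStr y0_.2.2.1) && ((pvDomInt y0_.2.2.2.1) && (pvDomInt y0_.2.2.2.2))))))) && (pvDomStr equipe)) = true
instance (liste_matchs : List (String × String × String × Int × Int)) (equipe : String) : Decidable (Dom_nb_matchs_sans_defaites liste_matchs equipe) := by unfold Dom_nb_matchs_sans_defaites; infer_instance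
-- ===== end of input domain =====

-- B replaces A's counter-and-reset accumulator pair by a filter/map to the boolean win
-- sequence followed by a block-by-block run scan (objective: alternative decomposition).

-- ===== PORT A =====
-- helper of A: winning team of a match, none on a draw
def equipe_gagnante (m : String × String × String × Int × Int) : Option String :=
  if m.2.2.2.1 > m.2.2.2.2 then some m.2.1
  else if m.2.2.2.1 < m.2.2.2.2 then some m.2.2.1
  else none

def nb_matchs_sans_defaites (liste_matchs : List (String × String × String × Int × Int)) (equipe : String) : Int :=
  let st := liste_matchs.foldl (fun (st : Int × Int) m =>
    if equipe_gagnante m == some equipe then (st.1, st.2 + 1)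
    else if equipe == m.2.1 || equipe == m.2.2.1 then
      ((if st.2 > st.1 then st.2 else st.1), 0)
    else st) (0, 0)
  if st.2 > st.1 then st.2 else st.1

-- ===== PORT B =====
-- B: the boolean win sequence of the matches the team played
def pvVictoires (liste_matchs : List (String × String × String × Int × Int)) (equipe : String) : List Bool :=
  (liste_matchs.filter (fun m => equipe == m.2.1 || equipe == m.2.2.1)).map
    (fun m => (m.2.2.2.1 > m.2.2.2.2 && m.2.1 == equipe) || (m.2.2.2.1 < m.2.2.2.2 && m.2.2.1 == equipe))

-- B's inner while: length of the leading win run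
def pvSerie : List Bool → Nat
  | [] => 0
  | b :: t => if b then pvSerie t + 1 else 0

-- B's outer while: scan block by block, keeping the best run seen
def pvLoopB (rest : List Bool) (meilleur : Int) : Int :=
  match rest with
  | [] => meilleur
  | b :: t =>
    let serie := pvSerie (b :: t)
    pvLoopB ((b :: t).drop (serie + 1)) (if (serie : Int) > meilleur then (serie : Int) else meilleur)
termination_by rest.length
decreasing_by simp [List.length_drop]

def nb_matchs_sans_defaites_alt (liste_matchs : List (String × String × String × Int × Int)) (equipe : String) : Int :=
  pvLoopB (pvVictoires liste_matchs equipe) 0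

-- ===== PRECONDITION & SPEC =====
def Spec_nb_matchs_sans_defaites (liste_matchs : List (String × String × String × Int × Int)) (equipe : String) (out : Int) : Prop := out = nb_matchs_sans_defaites_alt liste_matchs equipe
instance (liste_matchs : List (String × String × String × Int × Int)) (equipe : String) (out : Int) : Decidable (Spec_nb_matchs_sans_defaites liste_matchs equipe out) := by unfold Spec_nb_matchs_sans_defaites; infer_instance

-- ===== CLAIM (what is proved, stated in full; the proofs are below) =====
def Claim_equal_nb_matchs_sans_defaites : Prop := ∀ (liste_matchs : List (String × String × String × Int × Int)) (equipe : String), Dom_nb_matchs_sans_defaites liste_matchs equipe → Spec_nb_matchs_sans_defaites liste_matchs equipe (nb_matchs_sans_defaites liste_matchs equipe)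

-- ===== LEMMAS AND PROOFS =====

-- A's step on the boolean win sequence
def pvStepBool (st : Int × Int) (w : Bool) : Int × Int :=
  if w then (st.1, st.2 + 1) else ((if st.2 > st.1 then st.2 else st.1), 0)

-- best streak given the length `cur` of the current open run
def pvMaxRun (cur : Int) : List Bool → Int
  | [] => cur
  | true :: t => pvMaxRun (cur + 1) t
  | false :: t => max cur (pvMaxRun 0 t)

lemma pvWon_iff (m : String × String × String × Int × Int) (equipe : String) :
    (equipe_gagnante m == some equipe) =
      ((m.2.2.2.1 > m.2.2.2.2 && m.2.1 == equipe) || (m.2.2.2.1 < m.2.2.2.2 && m.2.2.1 == equipe)) := by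
  simp only [equipe_gagnante]
  split_ifs <;> simp_all; omega

lemma pvWon_plays (m : String × String × String × Int × Int) (equipe : String)
    (h : (equipe_gagnante m == some equipe) = true) : (equipe == m.2.1 || equipe == m.2.2.1) = true := by
  simp only [equipe_gagnante] at h
  split_ifs at h
  · simp only [Option.some.injEq, beq_iff_eq] at h; subst h; simp
  · simp only [Option.some.injEq, beq_iff_eq] at h; subst h; simp
  · simp at h

-- A's fold over the matches equals the fold of pvStepBool over B's win sequence
lemma pvFold_eq (liste : List (String × String × String × Int × Int)) (equipe : String) :
    ∀ st : Int × Int,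
    liste.foldl (fun (st : Int × Int) m =>
      if equipe_gagnante m == some equipe then (st.1, st.2 + 1)
      else if equipe == m.2.1 || equipe == m.2.2.1 then
        ((if st.2 > st.1 then st.2 else st.1), 0)
      else st) st
    = (pvVictoires liste equipe).foldl pvStepBool st := by
  induction liste with
  | nil => intro st; simp [pvVictoires]
  | cons m t ih =>
    intro st
    by_cases hw : (equipe_gagnante m == some equipe) = true
    · have hp := pvWon_plays m equipe hw
      have hb : ((m.2.2.2.1 > m.2.2.2.2 && m.2.1 == equipe) || (m.2.2.2.1 < m.2.2.2.2 && m.2.2.1 == equipe)) = true := by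
        rw [← pvWon_iff]; exact hw
      simp only [pvVictoires, List.filter_cons, hp, if_true, List.map_cons, List.foldl_cons,
        hw, hb, pvStepBool, if_true] at ih ⊢
      exact ih _
    · have hw' : (equipe_gagnante m == some equipe) = false := by simpa using hw
      have hb : ((m.2.2.2.1 > m.2.2.2.2 && m.2.1 == equipe) || (m.2.2.2.1 < m.2.2.2.2 && m.2.2.1 == equipe)) = false := by
        rw [← pvWon_iff]; exact hw'
      by_cases hp : (equipe == m.2.1 || equipe == m.2.2.1) = true
      · simp only [pvVictoires, List.filter_cons, hp, if_true, List.map_cons, List.foldl_cons,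
          hw', hb, pvStepBool, Bool.false_eq_true, if_false] at ih ⊢
        exact ih _
      · have hp' : (equipe == m.2.1 || equipe == m.2.2.1) = false := by simpa using hp
        simp only [pvVictoires, List.filter_cons, hp', List.foldl_cons,
          hw', Bool.false_eq_true, if_false] at ih ⊢
        exact ih _

-- finalized pvStepBool fold = max of the stored best and the best streak from `cur`
lemma pvFoldBool_eq (ws : List Bool) : ∀ maxv cur : Int,
    (let st := ws.foldl pvStepBool (maxv, cur); if st.2 > st.1 then st.2 else st.1)
      = max maxv (pvMaxRun cur ws) := by
  induction ws with
  | nil => intro maxv cur; simp [pvMaxRun, max_def]; split_ifs <;> omega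
  | cons b t ih =>
    intro maxv cur
    cases b with
    | true => simpa [pvStepBool, pvMaxRun] using ih maxv (cur + 1)
    | false =>
      simp only [List.foldl_cons, pvStepBool, if_neg (by simp : ¬ (false = true)), pvMaxRun]
      have := ih (if cur > maxv then cur else maxv) 0
      simp only at this
      rw [this]
      have : (if cur > maxv then cur else maxv) = max maxv cur := by
        rw [max_def]; split_ifs <;> omega
      rw [this, max_assoc]

-- splitting off the leading run
lemma pvMaxRun_split (ws : List Bool) : ∀ cur : Int, 0 ≤ cur →
    pvMaxRun cur ws = max (cur + (pvSerie ws : Int)) (pvMaxRun 0 (ws.drop (pvSerie ws + 1))) := by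
  induction ws with
  | nil => intro cur h; simp [pvMaxRun, pvSerie]; omega
  | cons b t ih =>
    intro cur h
    cases b with
    | true =>
      have := ih (cur + 1) (by omega)
      simp only [pvMaxRun, pvSerie] at *
      rw [this]
      have : (pvSerie t + 1 + 1) = pvSerie t + 1 + 1 := rfl
      simp only [List.drop_succ_cons]
      congr 1
      push_cast; ring
    | false =>
      simp [pvMaxRun, pvSerie]

-- B's loop computes max of the accumulator and the best streak
lemma pvLoopB_max (n : Nat) : ∀ ws : List Bool, ws.length ≤ n → ∀ meilleur : Int, 0 ≤ meilleur →
    pvLoopB ws meilleur = max meilleur (pvMaxRun 0 ws) := by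
  induction n with
  | zero =>
    intro ws h meilleur hm
    have : ws = [] := by cases ws <;> simp_all
    subst this
    rw [pvLoopB.eq_def]
    simp [pvMaxRun]; omega
  | succ n ih =>
    intro ws h meilleur hm
    cases ws with
    | nil => rw [pvLoopB.eq_def]; simp [pvMaxRun]; omega
    | cons b t =>
      rw [pvLoopB.eq_def]
      simp only
      rw [ih _ (by simp [List.length_drop] at *; omega) _ (by split_ifs <;> omega)]
      rw [pvMaxRun_split (b :: t) 0 le_rfl]
      have : (if ((pvSerie (b :: t) : Int)) > meilleur then ((pvSerie (b :: t) : Int)) else meilleur)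
          = max meilleur (pvSerie (b :: t) : Int) := by
        rw [max_def]; split_ifs <;> omega
      rw [this, max_assoc]
      congr 2
      omega

-- ===== VERDICT (by name: the statement is the Claim_ definition above) =====
theorem nb_matchs_sans_defaites_spec : Claim_equal_nb_matchs_sans_defaites := by
  intro liste equipe _
  unfold Spec_nb_matchs_sans_defaites nb_matchs_sans_defaites nb_matchs_sans_defaites_alt
  rw [pvFold_eq]
  have h1 := pvFoldBool_eq (pvVictoires liste equipe) 0 0
  simp only at h1
  rw [h1, pvLoopB_max (pvVictoires liste equipe).length _ le_rfl 0 le_rfl]
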